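-- pv_equiv track=rewrite | github.com/chronophage/kon-reh | ttrpg/code/python/deck_simulator/deck_simulator.py | get_clock_size
-- ===== SOURCE A (Python) =====
-- from typing import Dict, List, Any, Optional
--
-- def get_clock_size(cards: List[Dict]) -> int:
--     """Determine clock size based on highest rank"""
--     rank_values = {
--         '2': 2, '3': 3, '4': 4, '5': 5, '6': 6, '7': 7, '8': 8, '9': 9, '10': 10,
--         'J': 11, 'Q': 12, 'K': 13, 'A': 14
--     }
--
--     max_rank_value = 0
--     for card in cards:
--         rank_val = rank_values.get(str(card['rank']), 0)
--         if rank_val > max_rank_value: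
--             max_rank_value = rank_val
--
--     # Convert to clock size
--     if max_rank_value <= 5:
--         return 4  # Minor
--     elif max_rank_value <= 10:
--         return 6  # Standard
--     elif max_rank_value <= 13:
--         return 8  # Major
--     else:
--         return 10  # Pivotal
-- ===== SOURCE B (Python) =====
-- def get_clock_size(cards):
--     """Determine clock size based on highest rank"""
--     ranks = {str(card['rank']) for card in cards}
--     if 'A' in ranks:
--         return 10  # Pivotal
--     if 'J' in ranks or 'Q' in ranks or 'K' in ranks:
--         return 8  # Major
--     if '6' in ranks or '7' in ranks or '8' in ranks or '9' in ranks or '10' in ranks: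
--         return 6  # Standard
--     return 4  # Minor
-- ===== Notes on version B (the rewrite author's own statement) =====
-- stated objective: alternative
-- what changed: B builds a set of the rank strings present and decides the clock size by top-down category membership tests, instead of A's numeric rank table, accumulated maximum and threshold ladder.
import Mathlib
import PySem

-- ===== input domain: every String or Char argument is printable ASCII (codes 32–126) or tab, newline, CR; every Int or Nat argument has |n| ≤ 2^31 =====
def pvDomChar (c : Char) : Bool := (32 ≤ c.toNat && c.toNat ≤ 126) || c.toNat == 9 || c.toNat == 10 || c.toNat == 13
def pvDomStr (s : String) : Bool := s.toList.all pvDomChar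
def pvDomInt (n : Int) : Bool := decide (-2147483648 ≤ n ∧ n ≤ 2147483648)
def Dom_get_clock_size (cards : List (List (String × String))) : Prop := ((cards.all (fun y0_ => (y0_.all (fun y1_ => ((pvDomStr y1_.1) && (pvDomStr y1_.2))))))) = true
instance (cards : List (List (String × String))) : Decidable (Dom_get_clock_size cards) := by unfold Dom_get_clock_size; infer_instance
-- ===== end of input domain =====

-- B replaces A's numeric rank table + accumulated maximum + threshold ladder by a set of the
-- present rank strings tested top-down by category membership (alternative decomposition).


-- ===== PORT A =====
-- the rank_values dict literal of A
def pvRankValues : PySem.Dict String Int :=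
  PySem.Dict.ofList [("2",2),("3",3),("4",4),("5",5),("6",6),("7",7),("8",8),("9",9),("10",10),("J",11),("Q",12),("K",13),("A",14)]

-- str(card['rank']); values are strings so str() is the identity.  The .getD "" default is
-- never reached under Pre_ (every card has a 'rank' key); Python raises KeyError there.
def pvRankStr (card : List (String × String)) : String :=
  ((PySem.Dict.mk card).get? "rank").getD ""

-- A's loop body: rank_val = rank_values.get(str(card['rank']), 0); if rank_val > max: max = rank_val
def pvStep (maxRankValue : Int) (s : String) : Int :=
  let rankVal := pvRankValues.getD s 0
  if rankVal > maxRankValue then rankVal else maxRankValue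

def get_clock_size (cards : List (List (String × String))) : Int :=
  let maxRankValue := cards.foldl (fun m card => pvStep m (pvRankStr card)) 0
  if maxRankValue ≤ 5 then 4
  else if maxRankValue ≤ 10 then 6
  else if maxRankValue ≤ 13 then 8
  else 10

-- ===== PORT B =====
def get_clock_size_alt (cards : List (List (String × String))) : Int :=
  let ranks : PySem.Set String := PySem.Set.ofList (cards.map pvRankStr)
  if ranks.contains "A" then 10
  else if ranks.contains "J" || ranks.contains "Q" || ranks.contains "K" then 8
  else if ranks.contains "6" || ranks.contains "7" || ranks.contains "8" || ranks.contains "9" || ranks.contains "10" then 6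
  else 4

-- ===== PRECONDITION & SPEC =====
-- Pre_ excludes exactly the inputs where A raises KeyError: a card without a 'rank' key.
def Pre_get_clock_size (cards : List (List (String × String))) : Prop :=
  ∀ card ∈ cards, (PySem.Dict.mk card).contains "rank" = true
instance (cards : List (List (String × String))) : Decidable (Pre_get_clock_size cards) := by unfold Pre_get_clock_size; infer_instance
def pvWitness_get_clock_size : (List (List (String × String))) := ([[("rank", "A")], [("rank", "7"), ("suit", "hearts")]])

def Spec_get_clock_size (cards : List (List (String × String))) (out : Int) : Prop := out = get_clock_size_alt cards
instance (cards : List (List (String × String))) (out : Int) : Decidable (Spec_get_clock_size cards out) := by unfold Spec_get_clock_size; infer_instance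

-- ===== CLAIM (what is proved, stated in full; the proofs are below) =====
def Claim_equal_get_clock_size : Prop := ∀ (cards : List (List (String × String))), Dom_get_clock_size cards → Pre_get_clock_size cards → Spec_get_clock_size cards (get_clock_size cards)

-- ===== LEMMAS AND PROOFS =====

theorem pv_getD_mk_lt (l : List (String × Int)) (s : String) (k : Int) (hk : 0 < k)
    (hnd : (l.map Prod.fst).Nodup) :
    (PySem.Dict.mk l).getD s 0 < k ↔ ∀ p ∈ l, p.1 = s → p.2 < k := by
  induction l with
  | nil => simpa [PySem.Dict.getD_eq_get?_getD, PySem.Dict.get?] using hk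
  | cons a t ih =>
    simp only [List.map_cons, List.nodup_cons] at hnd
    rw [PySem.Dict.getD_eq_get?_getD, PySem.Dict.get?_mk_cons]
    by_cases h : a.1 = s
    · subst h
      simp only [beq_self_eq_true, if_true, Option.getD_some, List.forall_mem_cons]
      constructor
      · intro hv
        exact ⟨by simpa using hv, fun p hp hps => absurd (List.mem_map.mpr ⟨p, hp, hps⟩) hnd.1⟩
      · intro h
        simpa using h.1
    · have hb : (a.1 == s) = false := beq_eq_false_iff_ne.mpr h
      rw [hb]
      simp only [Bool.false_eq_true, if_false, List.forall_mem_cons]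
      rw [← PySem.Dict.getD_eq_get?_getD, ih hnd.2]
      simp [h]
theorem pv_rv_lt_14_iff (s : String) : pvRankValues.getD s 0 < 14 ↔ ¬ "A" = s := by
  rw [show pvRankValues = PySem.Dict.mk [("2",2),("3",3),("4",4),("5",5),("6",6),("7",7),("8",8),("9",9),("10",10),("J",11),("Q",12),("K",13),("A",14)] from by decide]
  rw [pv_getD_mk_lt _ s 14 (by omega) (by decide)]
  simp
theorem pv_rv_lt_11_iff (s : String) :
    pvRankValues.getD s 0 < 11 ↔ ¬ ("J" = s ∨ "Q" = s ∨ "K" = s ∨ "A" = s) := by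
  rw [show pvRankValues = PySem.Dict.mk [("2",2),("3",3),("4",4),("5",5),("6",6),("7",7),("8",8),("9",9),("10",10),("J",11),("Q",12),("K",13),("A",14)] from by decide]
  rw [pv_getD_mk_lt _ s 11 (by omega) (by decide)]
  simp [not_or]
theorem pv_rv_lt_6_iff (s : String) :
    pvRankValues.getD s 0 < 6 ↔
      ¬ ("6" = s ∨ "7" = s ∨ "8" = s ∨ "9" = s ∨ "10" = s ∨ "J" = s ∨ "Q" = s ∨ "K" = s ∨ "A" = s) := by
  rw [show pvRankValues = PySem.Dict.mk [("2",2),("3",3),("4",4),("5",5),("6",6),("7",7),("8",8),("9",9),("10",10),("J",11),("Q",12),("K",13),("A",14)] from by decide]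
  rw [pv_getD_mk_lt _ s 6 (by omega) (by decide)]
  simp [not_or]

theorem pv_forall_not (rs : List String) (a : String) : (∀ s ∈ rs, ¬ a = s) ↔ a ∉ rs := by
  constructor
  · intro h ha; exact h a ha rfl
  · intro h s hs he; exact h (he ▸ hs)

theorem pv_step_eq_max (m : Int) (s : String) : pvStep m s = max m (pvRankValues.getD s 0) := by
  unfold pvStep
  simp only [max_def]
  split_ifs <;> omega

theorem pv_foldl_max_lt (rs : List String) (m k : Int) :
    rs.foldl pvStep m < k ↔ m < k ∧ ∀ s ∈ rs, pvRankValues.getD s 0 < k := by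
  induction rs generalizing m with
  | nil => simp
  | cons s rs ih =>
    simp only [List.foldl_cons, ih, pv_step_eq_max, max_lt_iff, List.mem_cons]
    constructor
    · rintro ⟨⟨h1, h2⟩, h3⟩
      exact ⟨h1, fun t ht => ht.elim (fun he => he ▸ h2) (h3 t)⟩
    · rintro ⟨h1, h2⟩
      exact ⟨⟨h1, h2 s (Or.inl rfl)⟩, fun t ht => h2 t (Or.inr ht)⟩

-- ===== VERDICT (by name: the statement is the Claim_ definition above) =====
set_option maxHeartbeats 1000000 in
theorem get_clock_size_spec : Claim_equal_get_clock_size := by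
  intro cards _ _
  unfold Spec_get_clock_size get_clock_size get_clock_size_alt
  rw [← List.foldl_map]
  set rs := cards.map pvRankStr with hrs
  set M := rs.foldl pvStep 0 with hM
  have hle13 : M ≤ 13 ↔ ∀ s ∈ rs, ¬ "A" = s := by
    have h := pv_foldl_max_lt rs 0 14
    simp only [pv_rv_lt_14_iff] at h
    constructor
    · intro hm; exact (h.1 (by omega)).2
    · intro hall; have := h.2 ⟨by omega, hall⟩; omega
  have hle10 : M ≤ 10 ↔ ∀ s ∈ rs, ¬ ("J" = s ∨ "Q" = s ∨ "K" = s ∨ "A" = s) := by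
    have h := pv_foldl_max_lt rs 0 11
    simp only [pv_rv_lt_11_iff] at h
    constructor
    · intro hm; exact (h.1 (by omega)).2
    · intro hall; have := h.2 ⟨by omega, hall⟩; omega
  have hle5 : M ≤ 5 ↔ ∀ s ∈ rs,
      ¬ ("6" = s ∨ "7" = s ∨ "8" = s ∨ "9" = s ∨ "10" = s ∨ "J" = s ∨ "Q" = s ∨ "K" = s ∨ "A" = s) := by
    have h := pv_foldl_max_lt rs 0 6
    simp only [pv_rv_lt_6_iff] at h
    constructor
    · intro hm; exact (h.1 (by omega)).2
    · intro hall; have := h.2 ⟨by omega, hall⟩; omega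
  have hA13 : M ≤ 13 ↔ "A" ∉ rs := by rw [hle13]; exact pv_forall_not rs "A" 
  have hA10 : M ≤ 10 ↔ ¬ ("J" ∈ rs ∨ "Q" ∈ rs ∨ "K" ∈ rs ∨ "A" ∈ rs) := by
    rw [hle10]; simp only [not_or, forall_and, ← pv_forall_not]
  have hA5 : M ≤ 5 ↔ ¬ ("6" ∈ rs ∨ "7" ∈ rs ∨ "8" ∈ rs ∨ "9" ∈ rs ∨ "10" ∈ rs ∨
      "J" ∈ rs ∨ "Q" ∈ rs ∨ "K" ∈ rs ∨ "A" ∈ rs) := by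
    rw [hle5]; simp only [not_or, forall_and, ← pv_forall_not]
  have hm1 : M ≤ 5 → M ≤ 10 := by omega
  have hm2 : M ≤ 10 → M ≤ 13 := by omega
  simp only [PySem.Set.contains_eq_listContains]
  simp only [Bool.or_eq_true, List.contains_iff_mem, PySem.Set.mem_ofList]
  by_cases c1 : "A" ∈ rs
  · have h13 : ¬ M ≤ 13 := fun h => (hA13.1 h) c1
    have h10 : ¬ M ≤ 10 := fun h => h13 (hm2 h)
    have h5 : ¬ M ≤ 5 := fun h => h10 (hm1 h)
    rw [if_neg h5, if_neg h10, if_neg h13, if_pos c1]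
  · by_cases c2 : ("J" ∈ rs ∨ "Q" ∈ rs) ∨ "K" ∈ rs
    · have h10 : ¬ M ≤ 10 := fun h => by
        rcases c2 with (hj | hq) | hk
        · exact (hA10.1 h) (Or.inl hj)
        · exact (hA10.1 h) (Or.inr (Or.inl hq))
        · exact (hA10.1 h) (Or.inr (Or.inr (Or.inl hk)))
      have h5 : ¬ M ≤ 5 := fun h => h10 (hm1 h)
      have h13 : M ≤ 13 := hA13.2 c1
      rw [if_neg h5, if_neg h10, if_pos h13, if_neg c1, if_pos c2]
    · by_cases c3 : ((("6" ∈ rs ∨ "7" ∈ rs) ∨ "8" ∈ rs) ∨ "9" ∈ rs) ∨ "10" ∈ rs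
      · have h5 : ¬ M ≤ 5 := fun h => by
          rcases c3 with (((h6 | h7) | h8) | h9) | hT
          · exact (hA5.1 h) (Or.inl h6)
          · exact (hA5.1 h) (Or.inr (Or.inl h7))
          · exact (hA5.1 h) (Or.inr (Or.inr (Or.inl h8)))
          · exact (hA5.1 h) (Or.inr (Or.inr (Or.inr (Or.inl h9))))
          · exact (hA5.1 h) (Or.inr (Or.inr (Or.inr (Or.inr (Or.inl hT)))))
        have h10 : M ≤ 10 := hA10.2 (fun hc => by
          rcases hc with hj | hq | hk | ha
          · exact c2 (Or.inl (Or.inl hj))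
          · exact c2 (Or.inl (Or.inr hq))
          · exact c2 (Or.inr hk)
          · exact c1 ha)
        rw [if_neg h5, if_pos h10, if_neg c1, if_neg c2, if_pos c3]
      · have h5 : M ≤ 5 := hA5.2 (fun hc => by
          rcases hc with h | h | h | h | h | h | h | h | h
          · exact c3 (Or.inl (Or.inl (Or.inl (Or.inl h))))
          · exact c3 (Or.inl (Or.inl (Or.inl (Or.inr h))))
          · exact c3 (Or.inl (Or.inl (Or.inr h)))
          · exact c3 (Or.inl (Or.inr h))
          · exact c3 (Or.inr h)
          · exact c2 (Or.inl (Or.inl h))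
          · exact c2 (Or.inl (Or.inr h))
          · exact c2 (Or.inr h)
          · exact c1 h)
        rw [if_pos h5, if_neg c1, if_neg c2, if_neg c3]
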